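-- pv_equiv track=rewrite | github.com/MrCopprHead/joswig | joswig.py | edgepaths
-- ===== SOURCE A (Python) =====
-- def edgepaths(edges, base):
--     result = []
--     for e1 in edges:
--         if(e1[0] == base):
--             if(not(e1 in result)):
--                 result.append(e1)
--         for e2 in edges:
--             if((e1[-1] == e2[0]) & (e1[0] == base)):
--                 p = e1+e2[1:]
--                 if(not(p in result)):
--                     result.append(p)
--     return result
-- ===== SOURCE B (Python) =====
-- def edgepaths(edges, base):
--     # stage 1: index edges by their start node (one pass)
--     start = {}
--     for e in edges:
--         start.setdefault(e[0], []).append(e)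
--     # stage 2: generate the full candidate stream, no dedup here:
--     # each base edge, immediately followed by all its one-hop extensions
--     stream = [p for e1 in start.get(base, [])
--                 for p in [e1] + [e1 + e2[1:] for e2 in start.get(e1[-1], [])]]
--     # stage 3: one ordered first-occurrence dedup pass
--     return [list(t) for t in dict.fromkeys(map(tuple, stream))]
-- ===== Notes on version B (the rewrite author's own statement) =====
-- stated objective: faster
-- what changed: B is a staged pipeline: it indexes edges by start node once, generates the whole candidate stream with a comprehension over only the matching edges (no dedup during generation), and finishes with a single ordered dict.fromkeys dedup pass, instead of A's nested all-pairs scan with an interleaved linear list-membership dedup.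
import Mathlib
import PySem

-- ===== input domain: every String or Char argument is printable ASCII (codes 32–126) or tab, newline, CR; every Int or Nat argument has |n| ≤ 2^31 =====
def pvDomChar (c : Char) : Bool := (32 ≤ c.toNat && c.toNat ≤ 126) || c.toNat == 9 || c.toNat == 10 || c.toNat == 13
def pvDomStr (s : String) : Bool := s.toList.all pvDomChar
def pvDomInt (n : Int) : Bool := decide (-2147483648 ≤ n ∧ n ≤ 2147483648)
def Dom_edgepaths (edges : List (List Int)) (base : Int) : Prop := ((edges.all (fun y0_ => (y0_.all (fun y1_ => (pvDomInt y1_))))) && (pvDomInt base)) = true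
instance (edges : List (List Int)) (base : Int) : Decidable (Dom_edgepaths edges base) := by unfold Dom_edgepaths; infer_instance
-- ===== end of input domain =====

-- B replaces A's nested all-pairs scan with interleaved list-membership dedup by a staged
-- pipeline: index by start node, generate the full candidate stream, one final ordered dedup
-- (objective: faster, asymptotic).

-- shared helpers: e[0] and e[-1]; exact whenever e ≠ [] (guaranteed by Pre_edgepaths)
def pvKey (e : List Int) : Int := (PySem.List.pyGet? e 0).getD 0
def pvLast (e : List Int) : Int := (PySem.List.pyGet? e (-1)).getD 0

-- ===== PORT A =====
def edgepaths (edges : List (List Int)) (base : Int) : List (List Int) :=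
  edges.foldl (fun result e1 =>
    let result := if pvKey e1 == base then
        (if result.contains e1 then result else result ++ [e1]) else result
    edges.foldl (fun result e2 =>
      if (pvLast e1 == pvKey e2) && (pvKey e1 == base) then
        let p := e1 ++ PySem.List.slice e2 (some 1) none
        if result.contains p then result else result ++ [p]
      else result) result) []

-- ===== PORT B =====
def edgepaths_alt (edges : List (List Int)) (base : Int) : List (List Int) :=
  let start := edges.foldl (fun d e => d.modify (pvKey e) [] (· ++ [e])) PySem.Dict.empty
  let stream := (start.getD base []).flatMap (fun e1 =>
    e1 :: (start.getD (pvLast e1) []).map (fun e2 => e1 ++ PySem.List.slice e2 (some 1) none))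
  PySem.List.dedup stream

-- ===== PRECONDITION & SPEC =====
-- Pre_ excludes exactly the inputs containing an empty edge [], on which Python A raises IndexError (e[0]).
def Pre_edgepaths (edges : List (List Int)) (base : Int) : Prop := ∀ e ∈ edges, e ≠ []
instance (edges : List (List Int)) (base : Int) : Decidable (Pre_edgepaths edges base) := by unfold Pre_edgepaths; infer_instance
def pvWitness_edgepaths : List (List Int) × Int := ([[1, 2], [2, 3]], 1)

def Spec_edgepaths (edges : List (List Int)) (base : Int) (out : List (List Int)) : Prop := out = edgepaths_alt edges base
instance (edges : List (List Int)) (base : Int) (out : List (List Int)) : Decidable (Spec_edgepaths edges base out) := by unfold Spec_edgepaths; infer_instance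

-- ===== CLAIM (what is proved, stated in full; the proofs are below) =====
def Claim_equal_edgepaths : Prop := ∀ (edges : List (List Int)) (base : Int), Dom_edgepaths edges base → Pre_edgepaths edges base → Spec_edgepaths edges base (edgepaths edges base)

-- ===== LEMMAS AND PROOFS =====

-- the candidate block A's iteration on e1 contributes (for a base edge e1)
def pvBlock (edges : List (List Int)) (e1 : List Int) : List (List Int) :=
  e1 :: (edges.filter (fun e2 => pvLast e1 == pvKey e2)).map
    (fun e2 => e1 ++ PySem.List.slice e2 (some 1) none)

-- B's index lookup is the filter of edges by start node
lemma pv_index_getD (edges : List (List Int)) (c : Int) :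
    (edges.foldl (fun d e => d.modify (pvKey e) [] (· ++ [e])) PySem.Dict.empty).getD c []
      = edges.filter (fun e => pvKey e == c) := by
  have h := PySem.Dict.getD_foldl_modify_append
      (l := edges.map (fun e => (pvKey e, e))) (d := PySem.Dict.empty) (c := c)
  rw [List.foldl_map] at h
  simpa [List.filter_map, List.map_map, Function.comp_def] using h

-- a guarded flatMap is a flatMap over the filter
lemma pv_flatMap_if {α β : Type} (l : List α) (p : α → Bool) (f : α → List β) :
    (l.flatMap (fun x => if p x then f x else [])) = (l.filter p).flatMap f := by
  induction l with
  | nil => rfl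
  | cons a t ih => by_cases h : p a <;> simp [h, ih]

-- A's per-e1 step (dedup-append of e1 then the inner scan) is a Set.add-fold over pvBlock
lemma pv_stepA (edges : List (List Int)) (base : Int) (r : List (List Int)) (e1 : List Int) :
    (edges.foldl (fun result e2 =>
        if (pvLast e1 == pvKey e2) && (pvKey e1 == base) then
          let p := e1 ++ PySem.List.slice e2 (some 1) none
          if result.contains p then result else result ++ [p]
        else result)
      (if pvKey e1 == base then (if r.contains e1 then r else r ++ [e1]) else r))
    = (if pvKey e1 == base then pvBlock edges e1 else []).foldl PySem.Set.add r := by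
  by_cases hb : (pvKey e1 == base) = true
  · simp only [hb, if_true, Bool.and_true, pvBlock, List.foldl_cons]
    have h := PySem.List.foldl_if_eq_foldl_filter
      (fun e2 => pvLast e1 == pvKey e2)
      (fun result e2 =>
        if result.contains (e1 ++ PySem.List.slice e2 (some 1) none) then result
        else result ++ [e1 ++ PySem.List.slice e2 (some 1) none]) edges
      (if r.contains e1 then r else r ++ [e1])
    rw [h, List.foldl_map]
    rfl
  · simp only [hb, Bool.false_eq_true, if_false, Bool.and_false, List.foldl_fixed,
      List.foldl_nil]

theorem edgepaths_spec : Claim_equal_edgepaths := by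
  intro edges base _ _
  unfold Spec_edgepaths edgepaths edgepaths_alt
  simp only []
  -- rewrite B: index lookups become filters, dedup becomes a Set.add fold
  rw [pv_index_getD]
  have hcong : ∀ e1 ∈ edges.filter (fun e => pvKey e == base),
      (e1 :: ((edges.foldl (fun d e => d.modify (pvKey e) [] (· ++ [e]))
          PySem.Dict.empty).getD (pvLast e1) []).map
        (fun e2 => e1 ++ PySem.List.slice e2 (some 1) none))
      = pvBlock edges e1 := by
    intro e1 _
    rw [pv_index_getD]
    unfold pvBlock
    congr 1
    congr 1
    exact List.filter_congr (fun e _ => Bool.beq_comm)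
  rw [List.flatMap_congr hcong, PySem.List.dedup_eq_ofList, PySem.Set.ofList_eq_foldl]
  -- rewrite A: each e1 contributes a Set.add-fold over its block, so A is the
  -- Set.add-fold over the flattened candidate stream
  calc edges.foldl (fun result e1 =>
        edges.foldl (fun result e2 =>
          if (pvLast e1 == pvKey e2) && (pvKey e1 == base) then
            let p := e1 ++ PySem.List.slice e2 (some 1) none
            if result.contains p then result else result ++ [p]
          else result)
        (if pvKey e1 == base then (if result.contains e1 then result else result ++ [e1])
         else result)) []
      = edges.foldl (fun r e1 =>
          (if pvKey e1 == base then pvBlock edges e1 else []).foldl PySem.Set.add r) [] := by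
        exact PySem.List.foldl_congr_mem edges _ _ [] (fun r e1 _ => pv_stepA edges base r e1)
    _ = (edges.flatMap (fun e1 =>
          if pvKey e1 == base then pvBlock edges e1 else [])).foldl PySem.Set.add [] := by
        rw [List.foldl_flatMap]
    _ = ((edges.filter (fun e => pvKey e == base)).flatMap
          (pvBlock edges)).foldl PySem.Set.add [] := by
        rw [pv_flatMap_if]
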